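-- pv_equiv track=rewrite | github.com/juanjoowendler/de_todo_con_python | exercises/trabajos_grupales/TP_4/modulo_principal.py | may_publicacion
-- ===== SOURCE A (Python) =====
-- def may_publicacion(decadas):
--     pos = []
--     may = 0
--     for i in range(len(decadas)):
--         if decadas == may:
--             pos.append(i)
--         elif decadas[i] > may:
--             may = decadas[i]
--             pos = [i]
--
--     return pos
-- ===== SOURCE B (Python) =====
-- def may_publicacion(decadas):
--     m = max(decadas, default=0)
--     return [decadas.index(m)] if m > 0 else []
-- ===== Notes on version B (the rewrite author's own statement) =====
-- stated objective: idiomatic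
-- what changed: Replaces A's single running-max index loop (with its reset-on-new-max branch and dead list==int comparison) by two library scans: max with default 0, then a first-index search when the maximum is positive, else the empty list.
import Mathlib
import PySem

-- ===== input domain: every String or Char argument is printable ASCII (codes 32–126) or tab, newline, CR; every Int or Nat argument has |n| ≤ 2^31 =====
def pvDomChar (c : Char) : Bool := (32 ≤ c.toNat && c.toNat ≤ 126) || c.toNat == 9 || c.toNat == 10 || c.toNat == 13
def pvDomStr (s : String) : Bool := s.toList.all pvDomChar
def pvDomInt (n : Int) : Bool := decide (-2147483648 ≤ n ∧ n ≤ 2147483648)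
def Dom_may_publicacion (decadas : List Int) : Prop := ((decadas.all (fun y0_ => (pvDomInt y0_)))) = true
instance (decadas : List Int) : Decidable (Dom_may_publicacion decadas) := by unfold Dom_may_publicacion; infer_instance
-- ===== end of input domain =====

-- B replaces A's running-max index loop by two library scans (max with default 0, then first index); same result, idiomatic.

-- ===== PORT A =====
-- literal port of A's loop; 'decadas == may' in A compares a list with an int, which is always False in Python
def may_publicacion (decadas : List Int) : List Int :=
  (((PySem.List.pyRange 0 decadas.length 1).foldl
    (fun (st : List Int × Int) i =>
      if False then (st.1 ++ [i], st.2)          -- 'if decadas == may' : list == int is always False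
      else if PySem.List.pyGetD decadas i 0 > st.2 then ([i], PySem.List.pyGetD decadas i 0)
      else st)
    ([], 0)) : List Int × Int).1

-- ===== PORT B =====
def may_publicacion_alt (decadas : List Int) : List Int :=
  let m := (PySem.List.max? decadas (fun x => x)).getD 0
  if m > 0 then [(((PySem.List.index? decadas m).getD 0 : Nat) : Int)] else []

-- ===== PRECONDITION & SPEC =====
def Spec_may_publicacion (decadas : List Int) (out : List Int) : Prop := out = may_publicacion_alt decadas
instance (decadas : List Int) (out : List Int) : Decidable (Spec_may_publicacion decadas out) := by unfold Spec_may_publicacion; infer_instance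

-- ===== CLAIM (what is proved, stated in full; the proofs are below) =====
def Claim_equal_may_publicacion : Prop := ∀ (decadas : List Int), Dom_may_publicacion decadas → Spec_may_publicacion decadas (may_publicacion decadas)

-- ===== LEMMAS AND PROOFS =====

-- A's loop body as a function of the (index, value) pair
def pvStep (st : List Int × Int) (p : Int × Int) : List Int × Int :=
  if p.2 > st.2 then ([p.1], p.2) else st

-- running max commutes with a max in the seed
theorem pvFoldlMaxMax (t : List Int) : ∀ (a b : Int), t.foldl max (max a b) = max a (t.foldl max b) := by
  induction t with
  | nil => intro a b; rfl
  | cons y t ih => intro a b; simp only [List.foldl_cons]; rw [max_assoc, ih]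

-- characterisation of A's loop over an enumerated suffix
theorem pvLoop_spec (xs : List Int) : ∀ (s : Int) (pos : List Int) (may : Int),
    (PySem.List.enumerate xs s).foldl pvStep (pos, may) =
      if xs.foldl max may > may
      then ([s + (((PySem.List.index? xs (xs.foldl max may)).getD 0 : Nat) : Int)], xs.foldl max may)
      else (pos, may) := by
  induction xs with
  | nil => intro s pos may; simp [PySem.List.enumerate_nil]
  | cons x t ih =>
    intro s pos may
    rw [PySem.List.enumerate_cons]
    simp only [List.foldl_cons]
    by_cases hx : x > may
    · have hmay : max may x = x := max_eq_right (le_of_lt hx)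
      rw [show pvStep (pos, may) (s, x) = ([s], x) from by simp [pvStep, hx]]
      rw [ih (s+1) [s] x]
      simp only [hmay]
      by_cases hMx : t.foldl max x > x
      · have hgt : t.foldl max x > may := lt_trans hx hMx
        rw [if_pos hMx, if_pos hgt]
        have hne : x ≠ t.foldl max x := ne_of_lt hMx
        rw [PySem.List.index?_cons_of_ne t hne]
        have hmem : t.foldl max x ∈ t :=
          (PySem.List.foldl_max_mem t x).resolve_left (by omega)
        obtain ⟨k, hk⟩ := Option.isSome_iff_exists.mp
          ((PySem.List.index?_isSome_iff t _).2 hmem)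
        rw [hk]
        simp only [Option.map_some, Option.getD_some, Prod.mk.injEq, List.cons.injEq,
          and_true]
        push_cast; ring
      · have hMeq : t.foldl max x = x :=
          le_antisymm (not_lt.mp hMx) (PySem.List.le_foldl_max t x).1
        rw [if_neg hMx, hMeq, if_pos hx, PySem.List.index?_cons_self]
        simp
    · have hmay : max may x = may := max_eq_left (not_lt.mp hx)
      rw [show pvStep (pos, may) (s, x) = (pos, may) from by simp only [pvStep, if_neg hx]]
      rw [ih (s+1) pos may]
      simp only [hmay]
      by_cases hMm : t.foldl max may > may
      · rw [if_pos hMm, if_pos hMm]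
        have hne : x ≠ t.foldl max may := by omega
        rw [PySem.List.index?_cons_of_ne t hne]
        have hmem : t.foldl max may ∈ t :=
          (PySem.List.foldl_max_mem t may).resolve_left (by omega)
        obtain ⟨k, hk⟩ := Option.isSome_iff_exists.mp
          ((PySem.List.index?_isSome_iff t _).2 hmem)
        rw [hk]
        simp only [Option.map_some, Option.getD_some, Prod.mk.injEq, List.cons.injEq,
          and_true]
        push_cast; ring
      · rw [if_neg hMm, if_neg hMm]

-- A's pyRange fold is the enumerate fold
theorem pvA_eq_enum (decadas : List Int) :
    may_publicacion decadas = ((PySem.List.enumerate decadas 0).foldl pvStep ([], 0)).1 := by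
  unfold may_publicacion
  rw [PySem.List.enumerate_eq_map_pyRange decadas 0, List.foldl_map]
  rfl

theorem pv_main (decadas : List Int) :
    may_publicacion decadas = may_publicacion_alt decadas := by
  rw [pvA_eq_enum, pvLoop_spec decadas 0 [] 0]
  cases decadas with
  | nil => decide
  | cons x t =>
    unfold may_publicacion_alt
    rw [PySem.List.max?_id_cons]
    simp only [Option.getD_some]
    rw [show (x :: t).foldl max 0 = max 0 (t.foldl max x) from by
      simp only [List.foldl_cons]; exact pvFoldlMaxMax t 0 x]
    by_cases hM : t.foldl max x > 0
    · rw [max_eq_right (le_of_lt hM)]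
      rw [if_pos hM, if_pos hM]
      simp
    · rw [if_neg (by omega), if_neg hM]

-- ===== VERDICT (by name: the statement is the Claim_ definition above) =====
theorem may_publicacion_spec : Claim_equal_may_publicacion := by
  intro decadas _
  unfold Spec_may_publicacion
  exact pv_main decadas
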